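-- pv_equiv track=rewrite | github.com/LeoJ1mmy/Rosettabox | backend/vocabulary/vocabulary_prompt_generator.py | _group_terms_by_context
-- ===== SOURCE A (Python) =====
-- from typing import List, Dict, Set, Optional
--
-- def _group_terms_by_context(terms: List[str]) -> Dict[str, List[str]]:
--     """根據上下文將術語分組"""
--     groups = {
--         "ai_ml": [],
--         "hardware": [],
--         "frameworks": [],
--         "companies": [],
--         "protocols": [],
--         "others": []
--     }
--
--     # 定義分類規則
--     ai_ml_keywords = {"GPT", "ChatGPT", "LLM", "AI", "Agent", "MCP", "Whisper", "Ollama", "vLLM"}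
--     hardware_keywords = {"NVIDIA", "CUDA", "GPU", "CPU", "RTX"}
--     framework_keywords = {"PyTorch", "TensorFlow", "Flask", "React", "TypeScript", "JavaScript", "Python"}
--     company_keywords = {"OpenAI", "Google", "Microsoft"}
--     protocol_keywords = {"API", "REST", "HTTP", "JSON"}
--
--     for term in terms:
--         if term in ai_ml_keywords:
--             groups["ai_ml"].append(term)
--         elif term in hardware_keywords:
--             groups["hardware"].append(term)
--         elif term in framework_keywords:
--             groups["frameworks"].append(term)
--         elif term in company_keywords:
--             groups["companies"].append(term)
--         elif term in protocol_keywords: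
--             groups["protocols"].append(term)
--         else:
--             groups["others"].append(term)
--
--     # 移除空組
--     groups = {k: v for k, v in groups.items() if v}
--
--     return groups
-- ===== SOURCE B (Python) =====
-- from typing import List, Dict
--
-- CATEGORIES = [
--     ("ai_ml", {"GPT", "ChatGPT", "LLM", "AI", "Agent", "MCP", "Whisper", "Ollama", "vLLM"}),
--     ("hardware", {"NVIDIA", "CUDA", "GPU", "CPU", "RTX"}),
--     ("frameworks", {"PyTorch", "TensorFlow", "Flask", "React", "TypeScript", "JavaScript", "Python"}),
--     ("companies", {"OpenAI", "Google", "Microsoft"}),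
--     ("protocols", {"API", "REST", "HTTP", "JSON"}),
-- ]
--
-- def _group_terms_by_context(terms: List[str]) -> Dict[str, List[str]]:
--     # Staged passes: one filter pass over `terms` per category (the keyword
--     # sets are pairwise disjoint, so filtering per category agrees with A's
--     # priority if/elif chain), then a final pass for the unclaimed terms.
--     result: Dict[str, List[str]] = {}
--     for cat, kws in CATEGORIES:
--         bucket = [t for t in terms if t in kws]
--         if bucket:
--             result[cat] = bucket
--     others = [t for t in terms if not any(t in kws for _, kws in CATEGORIES)]
--     if others:
--         result["others"] = others
--     return result
-- ===== Notes on version B (the rewrite author's own statement) =====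
-- stated objective: alternative
-- what changed: Instead of A's single pass classifying each term through a five-way if/elif chain into pre-seeded buckets, B makes one filter pass over the terms per category (correct because the keyword sets are pairwise disjoint) plus a final pass for unmatched terms, building only non-empty entries directly in canonical order.
import Mathlib
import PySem

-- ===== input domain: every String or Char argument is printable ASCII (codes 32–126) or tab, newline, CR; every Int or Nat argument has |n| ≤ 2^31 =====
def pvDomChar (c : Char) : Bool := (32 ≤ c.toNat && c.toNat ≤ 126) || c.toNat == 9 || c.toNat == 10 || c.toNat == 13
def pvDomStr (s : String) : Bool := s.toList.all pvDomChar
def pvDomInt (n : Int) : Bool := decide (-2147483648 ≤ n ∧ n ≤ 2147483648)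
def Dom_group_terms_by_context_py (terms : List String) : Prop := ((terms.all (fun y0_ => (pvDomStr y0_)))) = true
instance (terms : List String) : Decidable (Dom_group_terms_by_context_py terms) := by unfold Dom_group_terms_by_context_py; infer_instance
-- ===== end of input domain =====

-- B replaces A's single classifying pass (five-way if/elif chain into pre-seeded
-- buckets) by staged passes: one filter pass over the terms per category (the
-- keyword sets are pairwise disjoint) plus a final pass for unmatched terms
-- (objective: alternative; same cost).

-- ===== PORT A =====
def pvAimlKw : PySem.Set String := PySem.Set.ofList ["GPT", "ChatGPT", "LLM", "AI", "Agent", "MCP", "Whisper", "Ollama", "vLLM"]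
def pvHardwareKw : PySem.Set String := PySem.Set.ofList ["NVIDIA", "CUDA", "GPU", "CPU", "RTX"]
def pvFrameworkKw : PySem.Set String := PySem.Set.ofList ["PyTorch", "TensorFlow", "Flask", "React", "TypeScript", "JavaScript", "Python"]
def pvCompanyKw : PySem.Set String := PySem.Set.ofList ["OpenAI", "Google", "Microsoft"]
def pvProtocolKw : PySem.Set String := PySem.Set.ofList ["API", "REST", "HTTP", "JSON"]

def pvGroups0 : PySem.Dict String (List String) :=
  PySem.Dict.mk [("ai_ml", []), ("hardware", []), ("frameworks", []), ("companies", []), ("protocols", []), ("others", [])]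

-- groups[k].append(term): k is always present in the dict, so it is d.modify k [] (· ++ [term])
def pvStepA (g : PySem.Dict String (List String)) (term : String) : PySem.Dict String (List String) :=
  if PySem.Set.contains pvAimlKw term then g.modify "ai_ml" [] (· ++ [term])
  else if PySem.Set.contains pvHardwareKw term then g.modify "hardware" [] (· ++ [term])
  else if PySem.Set.contains pvFrameworkKw term then g.modify "frameworks" [] (· ++ [term])
  else if PySem.Set.contains pvCompanyKw term then g.modify "companies" [] (· ++ [term])
  else if PySem.Set.contains pvProtocolKw term then g.modify "protocols" [] (· ++ [term])
  else g.modify "others" [] (· ++ [term])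

-- the final dict comprehension {k: v for k, v in groups.items() if v}
def group_terms_by_context_py (terms : List String) : List (String × List String) :=
  ((terms.foldl pvStepA pvGroups0).items).filter (fun kv => !kv.2.isEmpty)

-- ===== PORT B =====
def pvCategoriesB : List (String × PySem.Set String) :=
  [("ai_ml", PySem.Set.ofList ["GPT", "ChatGPT", "LLM", "AI", "Agent", "MCP", "Whisper", "Ollama", "vLLM"]),
   ("hardware", PySem.Set.ofList ["NVIDIA", "CUDA", "GPU", "CPU", "RTX"]),
   ("frameworks", PySem.Set.ofList ["PyTorch", "TensorFlow", "Flask", "React", "TypeScript", "JavaScript", "Python"]),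
   ("companies", PySem.Set.ofList ["OpenAI", "Google", "Microsoft"]),
   ("protocols", PySem.Set.ofList ["API", "REST", "HTTP", "JSON"])]

-- result[cat] = bucket on a fresh dict with distinct keys = append (cat, bucket);
-- the final 'others' pass keeps the terms matching no category's keyword set
def group_terms_by_context_py_alt (terms : List String) : List (String × List String) :=
  let result := pvCategoriesB.foldl (fun acc p =>
      let bucket := terms.filter (fun t => PySem.Set.contains p.2 t)
      if bucket.isEmpty then acc else acc ++ [(p.1, bucket)]) []
  let others := terms.filter (fun t => !(pvCategoriesB.any (fun p => PySem.Set.contains p.2 t)))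
  if others.isEmpty then result else result ++ [("others", others)]

-- ===== PRECONDITION & SPEC =====
def Spec_group_terms_by_context_py (terms : List String) (out : List (String × List String)) : Prop := out = group_terms_by_context_py_alt terms
instance (terms : List String) (out : List (String × List String)) : Decidable (Spec_group_terms_by_context_py terms out) := by unfold Spec_group_terms_by_context_py; infer_instance

-- ===== CLAIM (what is proved, stated in full; the proofs are below) =====
def Claim_equal_group_terms_by_context_py : Prop := ∀ (terms : List String), Dom_group_terms_by_context_py terms → Spec_group_terms_by_context_py terms (group_terms_by_context_py terms)

-- ===== LEMMAS AND PROOFS =====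

def pvOrderB : List String := ["ai_ml", "hardware", "frameworks", "companies", "protocols", "others"]

-- the category A's if/elif chain assigns to a term
def pvCatOf (term : String) : String :=
  if PySem.Set.contains pvAimlKw term then "ai_ml"
  else if PySem.Set.contains pvHardwareKw term then "hardware"
  else if PySem.Set.contains pvFrameworkKw term then "frameworks"
  else if PySem.Set.contains pvCompanyKw term then "companies"
  else if PySem.Set.contains pvProtocolKw term then "protocols"
  else "others"

theorem pvStepA_eq : pvStepA = fun g term => g.modify (pvCatOf term) [] (· ++ [term]) := by
  funext g term; unfold pvStepA pvCatOf; split_ifs <;> rfl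

theorem pvCatOf_mem (term : String) : pvCatOf term ∈ pvOrderB := by
  unfold pvCatOf pvOrderB; split_ifs <;> simp

theorem pvSet_update_of_subset (s : PySem.Set String) (l : List String)
    (h : ∀ x ∈ l, x ∈ s) : PySem.Set.update s l = s := by
  induction l generalizing s with
  | nil => rfl
  | cons x xs ih =>
    have hx : PySem.Set.add s x = s := by simp [PySem.Set.add, h x (by simp)]
    simp only [PySem.Set.update, List.foldl_cons] at *
    rw [hx]; exact ih s (fun y hy => h y (by simp [hy]))

-- the bucket each category ends up with
def pvF (terms : List String) (c : String) : List String :=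
  terms.filter (fun t => pvCatOf t == c)

theorem pv_getD_fold (terms : List String) (d : PySem.Dict String (List String)) (c : String) :
    (terms.foldl (fun g t => g.modify (pvCatOf t) [] (· ++ [t])) d).getD c []
      = d.getD c [] ++ pvF terms c := by
  have h1 : terms.foldl (fun g t => g.modify (pvCatOf t) [] (· ++ [t])) d
      = (terms.map (fun t => (pvCatOf t, t))).foldl (fun g p => g.modify p.1 [] (· ++ [p.2])) d := by
    rw [List.foldl_map]
  rw [h1, PySem.Dict.getD_foldl_modify_append, pvF, List.filter_map]
  simp [Function.comp_def]

theorem pv_keys_fold (terms : List String) :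
    (terms.foldl (fun g t => g.modify (pvCatOf t) [] (· ++ [t])) pvGroups0).keys = pvOrderB := by
  have h := PySem.Dict.keys_foldl_modify_key terms pvCatOf ([] : List String)
    (fun _ t v => v ++ [t]) pvGroups0
  simp only at h
  rw [h]
  have hk : pvGroups0.keys = pvOrderB := by decide
  rw [hk]
  exact pvSet_update_of_subset _ _ (by intro x hx; obtain ⟨t, _, rfl⟩ := List.mem_map.mp hx; exact pvCatOf_mem t)

-- A's result, characterised: the canonical categories in order, each with its bucket, empty ones dropped
theorem pvA_char (terms : List String) :
    group_terms_by_context_py terms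
      = (pvOrderB.filter (fun c => !(pvF terms c).isEmpty)).map (fun c => (c, pvF terms c)) := by
  unfold group_terms_by_context_py
  rw [pvStepA_eq]
  have hnd : (terms.foldl (fun g t => g.modify (pvCatOf t) [] (· ++ [t])) pvGroups0).keys.Nodup := by
    rw [pv_keys_fold]; decide
  rw [PySem.Dict.items_eq_map_keys _ hnd ([] : List String), pv_keys_fold]
  have hget' : ∀ c ∈ pvOrderB,
      (terms.foldl (fun g t => g.modify (pvCatOf t) [] (· ++ [t])) pvGroups0).getD c []
        = pvF terms c := by
    intro c hc
    rw [pv_getD_fold]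
    fin_cases hc <;>
      simp [pvGroups0, PySem.Dict.getD_eq_get?_getD, PySem.Dict.get?_mk_cons]
  rw [List.map_congr_left (fun c hc => by rw [hget' c hc])]
  rw [List.filter_map]
  congr 1

-- pairwise disjointness of the keyword sets (earlier set claims a term → later sets do not)
theorem pvDisjA (t : String) (h : t ∈ pvAimlKw) :
    t ∉ pvHardwareKw ∧ t ∉ pvFrameworkKw ∧ t ∉ pvCompanyKw ∧ t ∉ pvProtocolKw := by
  rw [show pvAimlKw = ["GPT", "ChatGPT", "LLM", "AI", "Agent", "MCP", "Whisper", "Ollama", "vLLM"] from by decide] at h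
  simp only [List.mem_cons, List.not_mem_nil, or_false] at h
  rcases h with rfl|rfl|rfl|rfl|rfl|rfl|rfl|rfl|rfl <;> decide

theorem pvDisjH (t : String) (h : t ∈ pvHardwareKw) :
    t ∉ pvFrameworkKw ∧ t ∉ pvCompanyKw ∧ t ∉ pvProtocolKw := by
  rw [show pvHardwareKw = ["NVIDIA", "CUDA", "GPU", "CPU", "RTX"] from by decide] at h
  simp only [List.mem_cons, List.not_mem_nil, or_false] at h
  rcases h with rfl|rfl|rfl|rfl|rfl <;> decide

theorem pvDisjF (t : String) (h : t ∈ pvFrameworkKw) :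
    t ∉ pvCompanyKw ∧ t ∉ pvProtocolKw := by
  rw [show pvFrameworkKw = ["PyTorch", "TensorFlow", "Flask", "React", "TypeScript", "JavaScript", "Python"] from by decide] at h
  simp only [List.mem_cons, List.not_mem_nil, or_false] at h
  rcases h with rfl|rfl|rfl|rfl|rfl|rfl|rfl <;> decide

theorem pvDisjC (t : String) (h : t ∈ pvCompanyKw) : t ∉ pvProtocolKw := by
  rw [show pvCompanyKw = ["OpenAI", "Google", "Microsoft"] from by decide] at h
  simp only [List.mem_cons, List.not_mem_nil, or_false] at h
  rcases h with rfl|rfl|rfl <;> decide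

-- each per-category membership test equals "A's chain chose this category"
theorem pvPtA (t : String) : PySem.Set.contains pvAimlKw t = (pvCatOf t == "ai_ml") := by
  unfold pvCatOf; cases hA : PySem.Set.contains pvAimlKw t <;> simp [hA] <;> split_ifs <;> decide

theorem pvPtH (t : String) : PySem.Set.contains pvHardwareKw t = (pvCatOf t == "hardware") := by
  unfold pvCatOf
  cases hA : PySem.Set.contains pvAimlKw t
  · simp only [hA, Bool.false_eq_true, if_false]
    cases hH : PySem.Set.contains pvHardwareKw t <;> simp [hH] <;> split_ifs <;> decide
  · have hm := (PySem.Set.contains_iff _ _).mp hA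
    simp [hA, (pvDisjA t hm).1]
theorem pvPtF (t : String) : PySem.Set.contains pvFrameworkKw t = (pvCatOf t == "frameworks") := by
  unfold pvCatOf
  cases hA : PySem.Set.contains pvAimlKw t
  · cases hH : PySem.Set.contains pvHardwareKw t
    · simp only [hA, hH, Bool.false_eq_true, if_false]
      cases hF : PySem.Set.contains pvFrameworkKw t <;> simp [hF] <;> split_ifs <;> decide
    · have hm := (PySem.Set.contains_iff _ _).mp hH
      simp [hA, hH, (pvDisjH t hm).1]
  · have hm := (PySem.Set.contains_iff _ _).mp hA
    simp [hA, (pvDisjA t hm).2.1]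
theorem pvPtC (t : String) : PySem.Set.contains pvCompanyKw t = (pvCatOf t == "companies") := by
  unfold pvCatOf
  cases hA : PySem.Set.contains pvAimlKw t
  · cases hH : PySem.Set.contains pvHardwareKw t
    · cases hF : PySem.Set.contains pvFrameworkKw t
      · simp only [hA, hH, hF, Bool.false_eq_true, if_false]
        cases hC : PySem.Set.contains pvCompanyKw t <;> simp [hC] <;> split_ifs <;> decide
      · have hm := (PySem.Set.contains_iff _ _).mp hF
        simp [hA, hH, hF, (pvDisjF t hm).1]
    · have hm := (PySem.Set.contains_iff _ _).mp hH
      simp [hA, hH, (pvDisjH t hm).2.1]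
  · have hm := (PySem.Set.contains_iff _ _).mp hA
    simp [hA, (pvDisjA t hm).2.2.1]
theorem pvPtP (t : String) : PySem.Set.contains pvProtocolKw t = (pvCatOf t == "protocols") := by
  unfold pvCatOf
  cases hA : PySem.Set.contains pvAimlKw t
  · cases hH : PySem.Set.contains pvHardwareKw t
    · cases hF : PySem.Set.contains pvFrameworkKw t
      · cases hC : PySem.Set.contains pvCompanyKw t
        · simp only [hA, hH, hF, hC, Bool.false_eq_true, if_false]
          cases hP : PySem.Set.contains pvProtocolKw t <;> simp [hP]
        · have hm := (PySem.Set.contains_iff _ _).mp hC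
          simp [hA, hH, hF, hC, pvDisjC t hm]
      · have hm := (PySem.Set.contains_iff _ _).mp hF
        simp [hA, hH, hF, (pvDisjF t hm).2]
    · have hm := (PySem.Set.contains_iff _ _).mp hH
      simp [hA, hH, (pvDisjH t hm).2.2]
  · have hm := (PySem.Set.contains_iff _ _).mp hA
    simp [hA, (pvDisjA t hm).2.2.2]
theorem pvPtO (t : String) :
    (!(PySem.Set.contains pvAimlKw t || PySem.Set.contains pvHardwareKw t ||
       PySem.Set.contains pvFrameworkKw t || PySem.Set.contains pvCompanyKw t ||
       PySem.Set.contains pvProtocolKw t)) = (pvCatOf t == "others") := by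
  unfold pvCatOf
  cases hA : PySem.Set.contains pvAimlKw t
  · cases hH : PySem.Set.contains pvHardwareKw t
    · cases hF : PySem.Set.contains pvFrameworkKw t
      · cases hC : PySem.Set.contains pvCompanyKw t
        · cases hP : PySem.Set.contains pvProtocolKw t <;> simp [hA, hH, hF, hC, hP]
        · simp [hA, hH, hF, hC]
      · simp [hA, hH, hF]
    · simp [hA, hH]
  · simp [hA]

-- B's result, characterised the same way
theorem pvB_char (terms : List String) :
    group_terms_by_context_py_alt terms
      = (pvOrderB.filter (fun c => !(pvF terms c).isEmpty)).map (fun c => (c, pvF terms c)) := by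
  unfold group_terms_by_context_py_alt
  have hfA : terms.filter (fun t => PySem.Set.contains pvAimlKw t) = pvF terms "ai_ml" :=
    List.filter_congr (fun t _ => pvPtA t)
  have hfH : terms.filter (fun t => PySem.Set.contains pvHardwareKw t) = pvF terms "hardware" :=
    List.filter_congr (fun t _ => pvPtH t)
  have hfF : terms.filter (fun t => PySem.Set.contains pvFrameworkKw t) = pvF terms "frameworks" :=
    List.filter_congr (fun t _ => pvPtF t)
  have hfC : terms.filter (fun t => PySem.Set.contains pvCompanyKw t) = pvF terms "companies" :=
    List.filter_congr (fun t _ => pvPtC t)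
  have hfP : terms.filter (fun t => PySem.Set.contains pvProtocolKw t) = pvF terms "protocols" :=
    List.filter_congr (fun t _ => pvPtP t)
  have hfO : terms.filter (fun t => !(pvCategoriesB.any (fun p => PySem.Set.contains p.2 t)))
      = pvF terms "others" := by
    refine List.filter_congr (fun t _ => ?_)
    have := pvPtO t
    simpa [pvCategoriesB, pvAimlKw, pvHardwareKw, pvFrameworkKw, pvCompanyKw, pvProtocolKw,
      Bool.or_assoc] using this
  rw [hfO]
  simp only [pvCategoriesB, List.foldl_cons, List.foldl_nil]
  rw [show (PySem.Set.ofList ["GPT", "ChatGPT", "LLM", "AI", "Agent", "MCP", "Whisper", "Ollama", "vLLM"]) = pvAimlKw from rfl,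
      show (PySem.Set.ofList ["NVIDIA", "CUDA", "GPU", "CPU", "RTX"]) = pvHardwareKw from rfl,
      show (PySem.Set.ofList ["PyTorch", "TensorFlow", "Flask", "React", "TypeScript", "JavaScript", "Python"]) = pvFrameworkKw from rfl,
      show (PySem.Set.ofList ["OpenAI", "Google", "Microsoft"]) = pvCompanyKw from rfl,
      show (PySem.Set.ofList ["API", "REST", "HTTP", "JSON"]) = pvProtocolKw from rfl]
  rw [hfA, hfH, hfF, hfC, hfP]
  simp only [pvOrderB, List.filter_cons, List.filter_nil, List.map]
  cases h1 : (pvF terms "ai_ml").isEmpty <;>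
  cases h2 : (pvF terms "hardware").isEmpty <;>
  cases h3 : (pvF terms "frameworks").isEmpty <;>
  cases h4 : (pvF terms "companies").isEmpty <;>
  cases h5 : (pvF terms "protocols").isEmpty <;>
  cases h6 : (pvF terms "others").isEmpty <;>
  simp [h1, h2, h3, h4, h5, h6]

-- ===== VERDICT (by name: the statement is the Claim_ definition above) =====
theorem group_terms_by_context_py_spec : Claim_equal_group_terms_by_context_py := by
  intro terms _
  unfold Spec_group_terms_by_context_py
  rw [pvA_char, pvB_char]
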